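-- pv_equiv track=rewrite | github.com/IlPakoZ/Uniroma1-Informatica | Fondamenti di Programmazione 1° semestre/Programmi Python/HW6obb/program01.py | get_possible_y_segments
-- ===== SOURCE A (Python) =====
-- def is_red(img,x,y):
--     try:
--         if img[y][x] == (255,0,0):                                       #Se il pixel a destra del nodo è rosso...
--             return True                                                 #Restituisci True
--     except IndexError:
--         pass
--     return False                                                        #Altrimenti restituisci False
--
-- def get_possible_y_segments(img, x_starting_index, y_starting_index, right_boundary_index, bottom_boundary_index, gap, dim):
--     ins = set()                                                         #Crea un insieme che conterrà tuple di valori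
--     count = 0                                                           #Conta a partire da 0
--
--     for x in range(x_starting_index, right_boundary_index+1, gap):      #Ci spostiamo verticalmente per ogni pixel della griglia
--         starting_y = y_starting_index                                   #Imposta l'indice da cui inizia a contare all'indice iniziale
--         for y in range(y_starting_index, bottom_boundary_index+1, gap): #Ci spostiamo verticalmente per ogni pixel orizzontale della griglia
--             if is_red(img,x,y+1):                                       #Se il pixel in basso del nodo è rosso...
--                 count+=1                                                #...allora conta che la lunghezza del segmento trovata è 1 in più a quella precedente
--             else:
--                 count = 0                                               #Se non è rosso, allora resetta il contatore (finisce lo strike di indici)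
--                 starting_y = y+gap                                      #Il nuovo indice da cui iniziare a contare è quello successivo
--
--             if count == dim:                                            #Se sono stati collegati dim nodi di seguito
--                 ins.add(((x-x_starting_index)//gap,(starting_y-y_starting_index)//gap,(y-y_starting_index)//gap + 1))  #Aggiungi una tupla contenente la componente x dove è stato trovato il segmento, la componente y da cui parte e quella in cui finisce
--                 count -= 1                                              #Decrementa di uno il contatore, riprendi a contare dal punto in cui sei arrivato
--                 starting_y = starting_y+gap                             #Il nuovo punto di partenza è quello precedente più il gap tra un pixel e l'altro
--         count = 0                                                       #Resetta il contatore
--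
--     return {x for x in ins if (x[0]+dim, x[1], x[2]) in ins}          #Mantieni i segmenti nell'insieme solo se, a "dim" di distanza per ogni segmento, c'è un altro segmento
-- ===== SOURCE B (Python) =====
-- def is_red(img, x, y):
--     try:
--         if img[y][x] == (255, 0, 0):
--             return True
--     except IndexError:
--         pass
--     return False
--
-- def get_possible_y_segments(img, x_starting_index, y_starting_index, right_boundary_index, bottom_boundary_index, gap, dim):
--     # per column: precompute the red flags, then slide a window of length dim
--     if dim < 1:
--         return set()
--     ys = range(y_starting_index, bottom_boundary_index + 1, gap)
--     ins = set()
--     for ci, x in enumerate(range(x_starting_index, right_boundary_index + 1, gap)):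
--         flags = [is_red(img, x, y + 1) for y in ys]
--         for s in range(len(flags) - dim + 1):
--             if all(flags[s:s + dim]):
--                 ins.add((ci, s, s + dim))
--     return {t for t in ins if (t[0] + dim, t[1], t[2]) in ins}
-- ===== Notes on version B (the rewrite author's own statement) =====
-- stated objective: alternative
-- what changed: Replaces A's per-pixel counter/starting_y state machine with a per-column precomputed red-flag list over which an all()-checked window of length dim slides; non-positive dim short-circuits to the empty set.
-- intended difference: For dim = 0, whenever some grid node in the scanned ranges has a non-red pixel below it, A's 'count == dim' test fires on the counter reset and A returns a nonempty set of degenerate zero-length segments such as (0, 1, 1), while B returns the empty set, the intended value since no segment of length 0 exists. — e.g. on get_possible_y_segments([], 0, 0, 0, 0, 1, 0): A returns [(0, 1, 1)], B returns []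
import Mathlib
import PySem

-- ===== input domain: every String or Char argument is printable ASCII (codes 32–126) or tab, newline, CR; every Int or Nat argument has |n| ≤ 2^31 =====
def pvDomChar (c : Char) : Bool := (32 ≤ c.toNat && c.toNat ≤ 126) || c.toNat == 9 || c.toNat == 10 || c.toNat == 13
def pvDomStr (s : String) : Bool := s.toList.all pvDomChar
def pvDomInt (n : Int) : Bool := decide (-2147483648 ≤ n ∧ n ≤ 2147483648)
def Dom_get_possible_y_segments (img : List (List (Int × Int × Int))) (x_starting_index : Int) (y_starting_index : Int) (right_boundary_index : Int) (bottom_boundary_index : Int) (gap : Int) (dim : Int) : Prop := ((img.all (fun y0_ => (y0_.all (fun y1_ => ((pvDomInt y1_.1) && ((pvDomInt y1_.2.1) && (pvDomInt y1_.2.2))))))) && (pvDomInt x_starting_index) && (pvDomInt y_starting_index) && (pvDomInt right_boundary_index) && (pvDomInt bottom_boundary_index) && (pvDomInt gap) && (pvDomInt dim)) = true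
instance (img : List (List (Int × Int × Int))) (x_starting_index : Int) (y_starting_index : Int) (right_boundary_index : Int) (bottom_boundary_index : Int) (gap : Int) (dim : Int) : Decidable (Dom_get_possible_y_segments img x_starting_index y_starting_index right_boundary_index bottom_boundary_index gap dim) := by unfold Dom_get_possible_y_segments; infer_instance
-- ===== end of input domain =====

-- B replaces A's per-pixel counter/starting_y state machine by a per-column red-flag list with a
-- sliding all()-checked window of length dim (alternative decomposition, same asymptotic cost);
-- for dim = 0 (see D_ below) B intentionally returns the empty set where A emits zero-length artifacts.


-- ===== PORT A =====
-- is_red: img[y][x] with Python negative-index wraparound; IndexError caught = False (exact via pyGet?)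
def is_red (img : List (List (Int × Int × Int))) (x y : Int) : Bool :=
  match PySem.List.pyGet? img y with
  | none => false
  | some row =>
    match PySem.List.pyGet? row x with
    | none => false
    | some p => p == ((255 : Int), (0 : Int), (0 : Int))

-- body of A's inner (y-)loop, one step of the fold
def pyA_innerstep (img : List (List (Int × Int × Int))) (xs0 ys0 gap dim x : Int)
    (st : PySem.Set (Int × Int × Int) × Int × Int) (y : Int) :
    PySem.Set (Int × Int × Int) × Int × Int :=
  let ins := st.1
  let count := if is_red img x (y + 1) then st.2.1 + 1 else 0
  let starting_y := if is_red img x (y + 1) then st.2.2 else y + gap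
  if count == dim then
    (PySem.Set.add ins
        (PySem.Int.floordiv (x - xs0) gap,
         PySem.Int.floordiv (starting_y - ys0) gap,
         PySem.Int.floordiv (y - ys0) gap + 1),
     count - 1, starting_y + gap)
  else (ins, count, starting_y)

-- body of A's outer (x-)loop: run the y-loop, then 'count = 0'
def pyA_colstep (img : List (List (Int × Int × Int))) (xs0 ys0 bb gap dim : Int)
    (st : PySem.Set (Int × Int × Int) × Int) (x : Int) :
    PySem.Set (Int × Int × Int) × Int :=
  let r := (PySem.List.pyRange ys0 (bb + 1) gap).foldl
      (pyA_innerstep img xs0 ys0 gap dim x) (st.1, st.2, ys0)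
  (r.1, 0)

def get_possible_y_segments (img : List (List (Int × Int × Int))) (x_starting_index : Int) (y_starting_index : Int) (right_boundary_index : Int) (bottom_boundary_index : Int) (gap : Int) (dim : Int) : List (Int × Int × Int) :=
  let ins := ((PySem.List.pyRange x_starting_index (right_boundary_index + 1) gap).foldl
      (pyA_colstep img x_starting_index y_starting_index bottom_boundary_index gap dim)
      (PySem.Set.empty, 0)).1
  -- final set comprehension over the set ins: an order-insensitive filter of the distinct elements (exact as a set)
  ins.filter (fun t => PySem.Set.contains ins (t.1 + dim, t.2.1, t.2.2))

-- ===== PORT B =====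
-- body of B's column loop: precompute the column's red flags, slide a window of length dim
def pyB_colstep (img : List (List (Int × Int × Int))) (ys0 bb gap dim : Int)
    (acc : PySem.Set (Int × Int × Int)) (cx : Int × Int) : PySem.Set (Int × Int × Int) :=
  let flags := (PySem.List.pyRange ys0 (bb + 1) gap).map (fun y => is_red img cx.2 (y + 1))
  (PySem.List.pyRange 0 ((flags.length : Int) - dim + 1) 1).foldl
    (fun acc2 s =>
      if (PySem.List.slice flags (some s) (some (s + dim))).all (fun b => b)
      then PySem.Set.add acc2 (cx.1, s, s + dim) else acc2)
    acc

def get_possible_y_segments_alt (img : List (List (Int × Int × Int))) (x_starting_index : Int) (y_starting_index : Int) (right_boundary_index : Int) (bottom_boundary_index : Int) (gap : Int) (dim : Int) : List (Int × Int × Int) :=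
  if dim < 1 then [] else
  let ins := (PySem.List.enumerate
      (PySem.List.pyRange x_starting_index (right_boundary_index + 1) gap) 0).foldl
    (pyB_colstep img y_starting_index bottom_boundary_index gap dim) PySem.Set.empty
  ins.filter (fun t => PySem.Set.contains ins (t.1 + dim, t.2.1, t.2.2))

-- ===== PRECONDITION & SPEC =====
-- Pre_ excludes only gap = 0, on which A's range(..., gap) raises ValueError.
def Pre_get_possible_y_segments (img : List (List (Int × Int × Int))) (x_starting_index : Int) (y_starting_index : Int) (right_boundary_index : Int) (bottom_boundary_index : Int) (gap : Int) (dim : Int) : Prop := gap ≠ 0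
instance (img : List (List (Int × Int × Int))) (x_starting_index : Int) (y_starting_index : Int) (right_boundary_index : Int) (bottom_boundary_index : Int) (gap : Int) (dim : Int) : Decidable (Pre_get_possible_y_segments img x_starting_index y_starting_index right_boundary_index bottom_boundary_index gap dim) := by unfold Pre_get_possible_y_segments; infer_instance
def pvWitness_get_possible_y_segments : (List (List (Int × Int × Int))) × Int × Int × Int × Int × Int × Int := ([], 0, 0, 0, 0, 1, 1)

-- For dim = 0, whenever some grid node in the scanned ranges has a non-red pixel below it, A's
-- 'count == dim' test fires on the counter reset and A returns a nonempty set of degenerate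
-- zero-length segments such as (0, 1, 1), while B returns the empty set, the intended value since
-- no segment of length 0 exists.
def D_get_possible_y_segments (img : List (List (Int × Int × Int))) (x_starting_index : Int) (y_starting_index : Int) (right_boundary_index : Int) (bottom_boundary_index : Int) (gap : Int) (dim : Int) : Prop :=
  dim = 0 ∧
    ∃ x ∈ PySem.List.pyRange x_starting_index (right_boundary_index + 1) gap,
      ∃ y ∈ PySem.List.pyRange y_starting_index (bottom_boundary_index + 1) gap,
        (PySem.List.pyGet? img (y + 1)).bind (fun row => PySem.List.pyGet? row x)
          ≠ some ((255 : Int), (0 : Int), (0 : Int))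
instance (img : List (List (Int × Int × Int))) (x_starting_index : Int) (y_starting_index : Int) (right_boundary_index : Int) (bottom_boundary_index : Int) (gap : Int) (dim : Int) : Decidable (D_get_possible_y_segments img x_starting_index y_starting_index right_boundary_index bottom_boundary_index gap dim) := by unfold D_get_possible_y_segments; infer_instance

def Spec_get_possible_y_segments (img : List (List (Int × Int × Int))) (x_starting_index : Int) (y_starting_index : Int) (right_boundary_index : Int) (bottom_boundary_index : Int) (gap : Int) (dim : Int) (out : List (Int × Int × Int)) : Prop := ¬ D_get_possible_y_segments img x_starting_index y_starting_index right_boundary_index bottom_boundary_index gap dim → out = get_possible_y_segments_alt img x_starting_index y_starting_index right_boundary_index bottom_boundary_index gap dim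
instance (img : List (List (Int × Int × Int))) (x_starting_index : Int) (y_starting_index : Int) (right_boundary_index : Int) (bottom_boundary_index : Int) (gap : Int) (dim : Int) (out : List (Int × Int × Int)) : Decidable (Spec_get_possible_y_segments img x_starting_index y_starting_index right_boundary_index bottom_boundary_index gap dim out) := by unfold Spec_get_possible_y_segments; infer_instance

def pvDiffWitness_get_possible_y_segments : (List (List (Int × Int × Int))) × Int × Int × Int × Int × Int × Int := ([], 0, 0, 0, 0, 1, 0)
def pvDiffWitnessOut_get_possible_y_segments : (List (Int × Int × Int)) × (List (Int × Int × Int)) := ([(0, 1, 1)], [])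

-- ===== CLAIM (what is proved, stated in full; the proofs are below) =====
def Claim_unchanged_get_possible_y_segments : Prop := ∀ (img : List (List (Int × Int × Int))) (x_starting_index : Int) (y_starting_index : Int) (right_boundary_index : Int) (bottom_boundary_index : Int) (gap : Int) (dim : Int), Dom_get_possible_y_segments img x_starting_index y_starting_index right_boundary_index bottom_boundary_index gap dim → Pre_get_possible_y_segments img x_starting_index y_starting_index right_boundary_index bottom_boundary_index gap dim → Spec_get_possible_y_segments img x_starting_index y_starting_index right_boundary_index bottom_boundary_index gap dim (get_possible_y_segments img x_starting_index y_starting_index right_boundary_index bottom_boundary_index gap dim)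
def Claim_changed_get_possible_y_segments : Prop := Dom_get_possible_y_segments (pvDiffWitness_get_possible_y_segments.1) (pvDiffWitness_get_possible_y_segments.2.1) (pvDiffWitness_get_possible_y_segments.2.2.1) (pvDiffWitness_get_possible_y_segments.2.2.2.1) (pvDiffWitness_get_possible_y_segments.2.2.2.2.1) (pvDiffWitness_get_possible_y_segments.2.2.2.2.2.1) (pvDiffWitness_get_possible_y_segments.2.2.2.2.2.2) ∧ Pre_get_possible_y_segments (pvDiffWitness_get_possible_y_segments.1) (pvDiffWitness_get_possible_y_segments.2.1) (pvDiffWitness_get_possible_y_segments.2.2.1) (pvDiffWitness_get_possible_y_segments.2.2.2.1) (pvDiffWitness_get_possible_y_segments.2.2.2.2.1) (pvDiffWitness_get_possible_y_segments.2.2.2.2.2.1) (pvDiffWitness_get_possible_y_segments.2.2.2.2.2.2) ∧ D_get_possible_y_segments (pvDiffWitness_get_possible_y_segments.1) (pvDiffWitness_get_possible_y_segments.2.1) (pvDiffWitness_get_possible_y_segments.2.2.1) (pvDiffWitness_get_possible_y_segments.2.2.2.1) (pvDiffWitness_get_possible_y_segments.2.2.2.2.1) (pvDiffWitness_get_possible_y_segments.2.2.2.2.2.1)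 (pvDiffWitness_get_possible_y_segments.2.2.2.2.2.2) ∧ get_possible_y_segments (pvDiffWitness_get_possible_y_segments.1) (pvDiffWitness_get_possible_y_segments.2.1) (pvDiffWitness_get_possible_y_segments.2.2.1) (pvDiffWitness_get_possible_y_segments.2.2.2.1) (pvDiffWitness_get_possible_y_segments.2.2.2.2.1) (pvDiffWitness_get_possible_y_segments.2.2.2.2.2.1) (pvDiffWitness_get_possible_y_segments.2.2.2.2.2.2) = pvDiffWitnessOut_get_possible_y_segments.1 ∧ get_possible_y_segments_alt (pvDiffWitness_get_possible_y_segments.1) (pvDiffWitness_get_possible_y_segments.2.1) (pvDiffWitness_get_possible_y_segments.2.2.1) (pvDiffWitness_get_possible_y_segments.2.2.2.1) (pvDiffWitness_get_possible_y_segments.2.2.2.2.1) (pvDiffWitness_get_possible_y_segments.2.2.2.2.2.1) (pvDiffWitness_get_possible_y_segments.2.2.2.2.2.2) = pvDiffWitnessOut_get_possible_y_segments.2 ∧ pvDiffWitnessOut_get_possible_y_segments.1 ≠ pvDiffWitnessOut_get_possible_y_segments.2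
def Claim_exact_get_possible_y_segments : Prop := ∀ (img : List (List (Int × Int × Int))) (x_starting_index : Int) (y_starting_index : Int) (right_boundary_index : Int) (bottom_boundary_index : Int) (gap : Int) (dim : Int), Dom_get_possible_y_segments img x_starting_index y_starting_index right_boundary_index bottom_boundary_index gap dim → Pre_get_possible_y_segments img x_starting_index y_starting_index right_boundary_index bottom_boundary_index gap dim → D_get_possible_y_segments img x_starting_index y_starting_index right_boundary_index bottom_boundary_index gap dim → get_possible_y_segments img x_starting_index y_starting_index right_boundary_index bottom_boundary_index gap dim ≠ get_possible_y_segments_alt img x_starting_index y_starting_index right_boundary_index bottom_boundary_index gap dim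

-- ===== LEMMAS AND PROOFS =====

-- length of list(range(a, b, g)) for g ≠ 0 (the count inside PySem.List.pyRange)
def pvRangeLen (a b g : Int) : Nat :=
  if 0 < g then (if a < b then ((b - a + g - 1) / g).toNat else 0)
  else (if b < a then ((a - b + -g - 1) / -g).toNat else 0)

lemma pvPyRange_eq (a b : Int) {g : Int} (hg : g ≠ 0) :
    PySem.List.pyRange a b g
      = (List.range (pvRangeLen a b g)).map (fun k : Nat => a + g * (k : Int)) := by
  unfold PySem.List.pyRange pvRangeLen
  rw [if_neg hg]

lemma pvFloordivCancel {g : Int} (hg : g ≠ 0) (k : Int) : PySem.Int.floordiv (g * k) g = k :=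
  Int.mul_fdiv_cancel_left k hg

lemma pvFoldlIteAdd {α β : Type} [BEq β] (p : α → Bool) (f : α → β) :
    ∀ (xs : List α) (acc : PySem.Set β),
      xs.foldl (fun a x => if p x then PySem.Set.add a (f x) else a) acc
        = PySem.Set.update acc ((xs.filter p).map f)
  | [], acc => by simp [PySem.Set.update_nil]
  | x :: xs, acc => by
    by_cases h : p x
    · simp only [List.foldl_cons, List.filter_cons, h, if_pos, List.map_cons,
        PySem.Set.update_cons]
      rw [pvFoldlIteAdd p f xs]
    · simp only [List.foldl_cons, List.filter_cons, h, Bool.false_eq_true, if_false]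
      rw [pvFoldlIteAdd p f xs]

lemma pvEnumMapRange' {α : Type} (f : Nat → α) :
    ∀ (n j : Nat), PySem.List.enumerate ((List.range' j n).map f) (j : Int)
      = (List.range' j n).map (fun (k : Nat) => ((k : Int), f k))
  | 0, _ => by simp
  | n + 1, j => by
    rw [List.range'_succ]
    simp only [List.map_cons, PySem.List.enumerate_cons]
    have := pvEnumMapRange' f n (j + 1)
    push_cast at this ⊢
    rw [this]

-- window / column abbreviations used only by the proofs
def pvWinTrue (P : Nat → Bool) (d s : Nat) : Bool := (List.range d).all (fun i => P (s + i))
def pvEndTrue (P : Nat → Bool) (d t : Nat) : Bool := decide (d ≤ t + 1) && pvWinTrue P d (t + 1 - d)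
def pvColP (img : List (List (Int × Int × Int))) (xs0 ys0 gap : Int) (ci : Nat) : Nat → Bool :=
  fun j => is_red img (xs0 + gap * (ci : Int)) (ys0 + gap * (j : Int) + 1)
def pvColWins (img : List (List (Int × Int × Int))) (xs0 ys0 gap : Int) (d n ci : Nat) :
    List (Int × Int × Int) :=
  ((List.range (n + 1 - d)).filter (pvWinTrue (pvColP img xs0 ys0 gap ci) d)).map
    (fun s => (((ci : Nat) : Int), ((s : Nat) : Int), ((s : Nat) : Int) + ((d : Nat) : Int)))

-- A's inner counter loop, indexed: an element is added exactly at the end position of each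
-- all-red window of length d (invariants: count = c with the last c flags red and maximal)
lemma pvColA (img : List (List (Int × Int × Int))) (xs0 ys0 gap dim : Int) (hg : gap ≠ 0)
    (d : Nat) (hd : 1 ≤ d) (hdim : dim = (d : Int)) (ci : Nat) :
    ∀ (n j c : Nat) (ins : PySem.Set (Int × Int × Int)),
      c + 1 ≤ d → c ≤ j →
      (∀ i, i < c → pvColP img xs0 ys0 gap ci (j - 1 - i) = true) →
      (c + 1 < d → (j = c ∨ pvColP img xs0 ys0 gap ci (j - c - 1) = false)) →
      ((List.range' j n).foldl
          (fun st (k : Nat) => pyA_innerstep img xs0 ys0 gap dim (xs0 + gap * (ci : Int)) st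
            (ys0 + gap * (k : Int)))
          (ins, (c : Int), ys0 + gap * ((j : Int) - (c : Int)))).1
        = PySem.Set.update ins
            (((List.range' j n).filter (pvEndTrue (pvColP img xs0 ys0 gap ci) d)).map
              (fun t => (((ci : Nat) : Int), ((t : Nat) : Int) + 1 - (d : Int), ((t : Nat) : Int) + 1)))
  | 0, j, c, ins, hc1, hcj, hrun, hmax => by
    simp [PySem.Set.update_nil]
  | n + 1, j, c, ins, hc1, hcj, hrun, hmax => by
    rw [List.range'_succ, List.foldl_cons, List.filter_cons]
    by_cases hP : pvColP img xs0 ys0 gap ci j = true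
    · have hP' : is_red img (xs0 + gap * (ci : Int)) (ys0 + gap * (j : Int) + 1) = true := hP
      by_cases hcd : c + 1 = d
      · -- emission step
        have hstep : pyA_innerstep img xs0 ys0 gap dim (xs0 + gap * (ci : Int))
            (ins, (c : Int), ys0 + gap * ((j : Int) - (c : Int))) (ys0 + gap * (j : Int))
            = (PySem.Set.add ins
                (((ci : Nat) : Int), ((j : Nat) : Int) + 1 - (d : Int), ((j : Nat) : Int) + 1),
               (c : Int), ys0 + gap * (((j + 1 : Nat) : Int) - (c : Int))) := by
          unfold pyA_innerstep
          simp only [hP', if_true]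
          rw [if_pos (by simp only [beq_iff_eq, hdim]; omega)]
          have e1 : xs0 + gap * (ci : Int) - xs0 = gap * (ci : Int) := by ring
          have e2 : ys0 + gap * ((j : Int) - (c : Int)) - ys0 = gap * ((j : Int) - (c : Int)) := by ring
          have e3 : ys0 + gap * (j : Int) - ys0 = gap * (j : Int) := by ring
          rw [e1, e2, e3, pvFloordivCancel hg, pvFloordivCancel hg, pvFloordivCancel hg]
          have e4 : (j : Int) - (c : Int) = (j : Int) + 1 - (d : Int) := by omega
          rw [e4]
          refine congrArg₂ Prod.mk rfl (congrArg₂ Prod.mk (by omega)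
            (by push_cast
                have hdc : (d : Int) = (c : Int) + 1 := by omega
                rw [hdc]; ring))
        rw [hstep]
        have hend : pvEndTrue (pvColP img xs0 ys0 gap ci) d j = true := by
          simp only [pvEndTrue, pvWinTrue, Bool.and_eq_true, decide_eq_true_eq,
            List.all_eq_true, List.mem_range]
          refine ⟨by omega, fun i hi => ?_⟩
          by_cases hlast : i = d - 1
          · have : j + 1 - d + i = j := by omega
            rw [this]; exact hP
          · have : j + 1 - d + i = j - 1 - (d - 2 - i) := by omega
            rw [this]; exact hrun _ (by omega)
        rw [hend, if_pos rfl, List.map_cons, PySem.Set.update_cons]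
        exact pvColA img xs0 ys0 gap dim hg d hd hdim ci n (j + 1) c _
          hc1 (by omega)
          (fun i hi => by
            rcases Nat.eq_zero_or_pos i with h0 | h0
            · subst h0; simpa using hP
            · have : j + 1 - 1 - i = j - 1 - (i - 1) := by omega
              rw [this]; exact hrun _ (by omega))
          (fun h => absurd h (by omega))
      · -- red pixel, no emission
        have hstep : pyA_innerstep img xs0 ys0 gap dim (xs0 + gap * (ci : Int))
            (ins, (c : Int), ys0 + gap * ((j : Int) - (c : Int))) (ys0 + gap * (j : Int))
            = (ins, ((c + 1 : Nat) : Int), ys0 + gap * (((j + 1 : Nat) : Int) - ((c + 1 : Nat) : Int))) := by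
          unfold pyA_innerstep
          simp only [hP', if_true]
          rw [if_neg (by simp only [beq_iff_eq, hdim]; omega)]
          refine congrArg₂ Prod.mk rfl (congrArg₂ Prod.mk (by omega) (by push_cast; ring))
        rw [hstep]
        have hend : pvEndTrue (pvColP img xs0 ys0 gap ci) d j = false := by
          apply Bool.eq_false_iff.mpr
          intro htrue
          simp only [pvEndTrue, pvWinTrue, Bool.and_eq_true, decide_eq_true_eq,
            List.all_eq_true, List.mem_range] at htrue
          obtain ⟨hdj, hall⟩ := htrue
          rcases hmax (by omega) with hjc | hF
          · omega
          · have := hall (d - c - 2) (by omega)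
            have e : j + 1 - d + (d - c - 2) = j - c - 1 := by omega
            rw [e, hF] at this
            exact Bool.false_ne_true this
        rw [hend]
        simp only [Bool.false_eq_true, if_false]
        exact pvColA img xs0 ys0 gap dim hg d hd hdim ci n (j + 1) (c + 1) ins
          (by omega) (by omega)
          (fun i hi => by
            rcases Nat.eq_zero_or_pos i with h0 | h0
            · subst h0; simpa using hP
            · have : j + 1 - 1 - i = j - 1 - (i - 1) := by omega
              rw [this]; exact hrun _ (by omega))
          (fun h => by
            rcases hmax (by omega) with hjc | hF
            · left; omega
            · right
              have : j + 1 - (c + 1) - 1 = j - c - 1 := by omega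
              rw [this]; exact hF)
    · -- pixel not red: counter resets, nothing emitted (dim ≥ 1)
      have hP' : is_red img (xs0 + gap * (ci : Int)) (ys0 + gap * (j : Int) + 1) = false := by
        rw [← Bool.not_eq_true]; exact hP
      have hstep : pyA_innerstep img xs0 ys0 gap dim (xs0 + gap * (ci : Int))
          (ins, (c : Int), ys0 + gap * ((j : Int) - (c : Int))) (ys0 + gap * (j : Int))
          = (ins, ((0 : Nat) : Int), ys0 + gap * (((j + 1 : Nat) : Int) - ((0 : Nat) : Int))) := by
        unfold pyA_innerstep
        simp only [hP', Bool.false_eq_true, if_false]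
        rw [if_neg (by simp only [beq_iff_eq, hdim]; omega)]
        refine congrArg₂ Prod.mk rfl (congrArg₂ Prod.mk (by omega) (by push_cast; ring))
      rw [hstep]
      have hend : pvEndTrue (pvColP img xs0 ys0 gap ci) d j = false := by
        apply Bool.eq_false_iff.mpr
        intro htrue
        simp only [pvEndTrue, pvWinTrue, Bool.and_eq_true, decide_eq_true_eq,
          List.all_eq_true, List.mem_range] at htrue
        obtain ⟨hdj, hall⟩ := htrue
        have := hall (d - 1) (by omega)
        have e : j + 1 - d + (d - 1) = j := by omega
        rw [e] at this
        exact Bool.false_ne_true (hP' ▸ this)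
      rw [hend]
      simp only [Bool.false_eq_true, if_false]
      exact pvColA img xs0 ys0 gap dim hg d hd hdim ci n (j + 1) 0 ins
        (by omega) (by omega) (fun i hi => by omega)
        (fun h => Or.inr (by simpa using hP'))

-- the same emitted list, re-indexed by window start instead of window end
lemma pvEndsEqStarts (P : Nat → Bool) (d : Nat) (hd : 1 ≤ d) (ci : Int) (n : Nat) :
    ((List.range n).filter (pvEndTrue P d)).map
        (fun t => (ci, ((t : Nat) : Int) + 1 - (d : Int), ((t : Nat) : Int) + 1))
      = ((List.range (n + 1 - d)).filter (pvWinTrue P d)).map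
        (fun s => (ci, ((s : Nat) : Int), ((s : Nat) : Int) + (d : Int))) := by
  by_cases hn : d ≤ n
  · have hsplit := List.range'_append (s := 0) (m := d - 1) (n := n + 1 - d) (step := 1)
    have e1 : 0 + 1 * (d - 1) = d - 1 := by omega
    have e2 : d - 1 + (n + 1 - d) = n := by omega
    rw [e1, e2] at hsplit
    rw [← List.range_eq_range'] at hsplit
    rw [← List.range_eq_range'] at hsplit
    rw [← hsplit, List.filter_append]
    have hnil : (List.range (d - 1)).filter (pvEndTrue P d) = [] := by
      apply List.filter_eq_nil_iff.mpr
      intro t ht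
      rw [List.mem_range] at ht
      simp only [pvEndTrue, Bool.and_eq_true, decide_eq_true_eq, not_and]
      intro h
      omega
    rw [hnil, List.nil_append]
    rw [List.range'_eq_map_range, List.filter_map, List.map_map]
    have hfe : (pvEndTrue P d ∘ fun s => d - 1 + s) = pvWinTrue P d := by
      funext s
      simp only [Function.comp_apply, pvEndTrue]
      have e : d - 1 + s + 1 - d = s := by omega
      rw [e]
      have : decide (d ≤ d - 1 + s + 1) = true := by simp; omega
      rw [this, Bool.true_and]
    rw [hfe]
    apply List.map_congr_left
    intro s hs
    simp only [Function.comp_apply]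
    refine congrArg₂ Prod.mk rfl (congrArg₂ Prod.mk (by omega) (by omega))
  · have h1 : (List.range n).filter (pvEndTrue P d) = [] := by
      apply List.filter_eq_nil_iff.mpr
      intro t ht
      rw [List.mem_range] at ht
      simp only [pvEndTrue, Bool.and_eq_true, decide_eq_true_eq, not_and]
      intro h
      omega
    have h2 : n + 1 - d = 0 := by omega
    rw [h1, h2]
    simp

lemma pvTakeDropRange (k d n : Nat) (h : k + d ≤ n) :
    List.take d (List.drop k (List.range n)) = List.range' k d := by
  apply List.ext_getElem
  · simp only [List.length_take, List.length_drop, List.length_range, List.length_range']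
    omega
  · intro i h1 h2
    simp only [List.getElem_take, List.getElem_drop, List.getElem_range, List.getElem_range']
    omega

-- B's column step adds exactly the all-red windows of the column, in start order
lemma pvColB (img : List (List (Int × Int × Int))) (ys0 bb gap dim : Int) (hg : gap ≠ 0)
    (d : Nat) (hdim : dim = (d : Int)) (ci x : Int)
    (acc : PySem.Set (Int × Int × Int)) :
    pyB_colstep img ys0 bb gap dim acc (ci, x)
      = PySem.Set.update acc
          (((List.range (pvRangeLen ys0 (bb + 1) gap + 1 - d)).filter
              (pvWinTrue (fun j => is_red img x (ys0 + gap * (j : Int) + 1)) d)).map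
            (fun s => (ci, ((s : Nat) : Int), ((s : Nat) : Int) + (d : Int)))) := by
  subst hdim
  unfold pyB_colstep
  simp only []
  rw [pvPyRange_eq ys0 (bb + 1) hg]
  set nY := pvRangeLen ys0 (bb + 1) gap with hnY
  rw [List.map_map]
  have hflags : ((fun y => is_red img (ci, x).2 (y + 1)) ∘ fun k : Nat => ys0 + gap * (k : Int))
      = (fun j : Nat => is_red img x (ys0 + gap * (j : Int) + 1)) := rfl
  rw [hflags]
  set P : Nat → Bool := fun j : Nat => is_red img x (ys0 + gap * (j : Int) + 1) with hP
  have hlen : (((List.range nY).map P).length : Int) = (nY : Int) := by simp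
  rw [hlen]
  rw [PySem.List.pyRange_one]
  have hcount : ((nY : Int) - (d : Int) + 1 - 0).toNat = nY + 1 - d := by omega
  rw [hcount, List.foldl_map]
  simp only [zero_add]
  rw [pvFoldlIteAdd
    (fun k : Nat => (PySem.List.slice ((List.range nY).map P) (some (k : Int))
      (some ((k : Int) + (d : Int)))).all (fun b => b))
    (fun k : Nat => (ci, (k : Int), (k : Int) + (d : Int)))]
  congr 1
  have hpw : ∀ k ∈ List.range (nY + 1 - d),
      (PySem.List.slice ((List.range nY).map P) (some (k : Int))
        (some ((k : Int) + (d : Int)))).all (fun b => b) = pvWinTrue P d k := by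
    intro k hk
    rw [List.mem_range] at hk
    have hkd : k + d ≤ nY := by omega
    rw [PySem.List.slice_natCast_add ((List.range nY).map P) k d]
    rw [← List.map_drop, ← List.map_take]
    rw [pvTakeDropRange k d nY hkd, List.range'_eq_map_range, List.map_map, List.all_map]
    rfl
  rw [List.filter_congr hpw]

lemma pvOuterA (img : List (List (Int × Int × Int))) (xs0 ys0 bb gap dim : Int) (hg : gap ≠ 0)
    (d : Nat) (hd : 1 ≤ d) (hdim : dim = (d : Int)) :
    ∀ (l : List Nat) (ins : PySem.Set (Int × Int × Int)),
      ((l.map (fun k : Nat => xs0 + gap * (k : Int))).foldl (pyA_colstep img xs0 ys0 bb gap dim) (ins, 0))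
        = (PySem.Set.update ins
            (l.flatMap (fun ci => pvColWins img xs0 ys0 gap d (pvRangeLen ys0 (bb + 1) gap) ci)), 0)
  | [], ins => by simp [PySem.Set.update_nil]
  | ci :: l, ins => by
    rw [List.map_cons, List.foldl_cons]
    have hcol : pyA_colstep img xs0 ys0 bb gap dim (ins, 0) (xs0 + gap * (ci : Int))
        = (PySem.Set.update ins (pvColWins img xs0 ys0 gap d (pvRangeLen ys0 (bb + 1) gap) ci), 0) := by
      unfold pyA_colstep
      simp only []
      rw [pvPyRange_eq ys0 (bb + 1) hg, List.foldl_map]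
      have hinit := pvColA img xs0 ys0 gap dim hg d hd hdim ci
        (pvRangeLen ys0 (bb + 1) gap) 0 0 ins (by omega) (by omega)
        (fun i hi => by omega) (fun h => Or.inl rfl)
      rw [← List.range_eq_range'] at hinit
      simp only [Nat.cast_zero, sub_self, mul_zero, add_zero] at hinit
      rw [hinit]
      congr 1
      rw [pvEndsEqStarts (pvColP img xs0 ys0 gap ci) d hd ((ci : Nat) : Int)
        (pvRangeLen ys0 (bb + 1) gap)]
      rfl
    rw [hcol, List.flatMap_cons, PySem.Set.update_append]
    exact pvOuterA img xs0 ys0 bb gap dim hg d hd hdim l _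

lemma pvOuterB (img : List (List (Int × Int × Int))) (xs0 ys0 bb gap dim : Int) (hg : gap ≠ 0)
    (d : Nat) (hd : 1 ≤ d) (hdim : dim = (d : Int)) :
    ∀ (l : List Nat) (acc : PySem.Set (Int × Int × Int)),
      ((l.map (fun k : Nat => ((k : Int), xs0 + gap * (k : Int)))).foldl
          (pyB_colstep img ys0 bb gap dim) acc)
        = PySem.Set.update acc
            (l.flatMap (fun ci => pvColWins img xs0 ys0 gap d (pvRangeLen ys0 (bb + 1) gap) ci))
  | [], acc => by simp [PySem.Set.update_nil]
  | ci :: l, acc => by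
    rw [List.map_cons, List.foldl_cons]
    rw [pvColB img ys0 bb gap dim hg d hdim ((ci : Nat) : Int) (xs0 + gap * (ci : Int)) acc]
    rw [List.flatMap_cons, PySem.Set.update_append]
    have hwins : ((List.range (pvRangeLen ys0 (bb + 1) gap + 1 - d)).filter
          (pvWinTrue (fun j => is_red img (xs0 + gap * (ci : Int)) (ys0 + gap * (j : Int) + 1)) d)).map
          (fun s => (((ci : Nat) : Int), ((s : Nat) : Int), ((s : Nat) : Int) + (d : Int)))
        = pvColWins img xs0 ys0 gap d (pvRangeLen ys0 (bb + 1) gap) ci := rfl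
    rw [hwins]
    exact pvOuterB img xs0 ys0 bb gap dim hg d hd hdim l _

-- dim < 0: A's counter stays ≥ 0 and never equals dim, so nothing is ever added
lemma pvInnerNoEmit (img : List (List (Int × Int × Int))) (xs0 ys0 gap dim x : Int) (hdim : dim < 0) :
    ∀ (ys : List Int) (st : PySem.Set (Int × Int × Int) × Int × Int), 0 ≤ st.2.1 →
      (ys.foldl (pyA_innerstep img xs0 ys0 gap dim x) st).1 = st.1
        ∧ 0 ≤ (ys.foldl (pyA_innerstep img xs0 ys0 gap dim x) st).2.1
  | [], st, h => ⟨rfl, h⟩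
  | y :: ys, st, h => by
    rw [List.foldl_cons]
    have hstep : pyA_innerstep img xs0 ys0 gap dim x st y
        = (st.1, if is_red img x (y + 1) then st.2.1 + 1 else 0,
           if is_red img x (y + 1) then st.2.2 else y + gap) := by
      unfold pyA_innerstep
      rw [if_neg]
      simp only [beq_iff_eq]
      split_ifs with hr <;> omega
    rw [hstep]
    exact pvInnerNoEmit img xs0 ys0 gap dim x hdim ys _ (by dsimp; split_ifs <;> omega)

lemma pvOuterNoEmit (img : List (List (Int × Int × Int))) (xs0 ys0 bb gap dim : Int) (hdim : dim < 0) :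
    ∀ (cols : List Int) (ins : PySem.Set (Int × Int × Int)),
      ((cols.foldl (pyA_colstep img xs0 ys0 bb gap dim) (ins, 0))).1 = ins
  | [], ins => rfl
  | x :: cols, ins => by
    rw [List.foldl_cons]
    have h := pvInnerNoEmit img xs0 ys0 gap dim x hdim
      (PySem.List.pyRange ys0 (bb + 1) gap) (ins, 0, ys0) (by norm_num)
    have hcol : pyA_colstep img xs0 ys0 bb gap dim (ins, 0) x = (ins, 0) := by
      unfold pyA_colstep
      simp only [h.1]
    rw [hcol]
    exact pvOuterNoEmit img xs0 ys0 bb gap dim hdim cols ins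

-- is_red, stated without the match (used to connect D_ with the ports)
lemma pvIsRedIff (img : List (List (Int × Int × Int))) (x y : Int) :
    is_red img x y = true
      ↔ (PySem.List.pyGet? img y).bind (fun row => PySem.List.pyGet? row x)
          = some ((255 : Int), (0 : Int), (0 : Int)) := by
  unfold is_red
  cases himg : PySem.List.pyGet? img y with
  | none => simp
  | some row =>
    cases hrow : PySem.List.pyGet? row x with
    | none => simp [hrow]
    | some p => simp [hrow]

lemma pvAddNeNil {α : Type} [BEq α] (s : PySem.Set α) (e : α) : PySem.Set.add s e ≠ [] := by
  unfold PySem.Set.add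
  split_ifs with h
  · intro hnil
    subst hnil
    simp [PySem.Set.contains] at h
  · simp

lemma pvStepShape (img : List (List (Int × Int × Int))) (xs0 ys0 gap dim x : Int)
    (st : PySem.Set (Int × Int × Int) × Int × Int) (y : Int) :
    (pyA_innerstep img xs0 ys0 gap dim x st y).1 = st.1
      ∨ ∃ e, (pyA_innerstep img xs0 ys0 gap dim x st y).1 = PySem.Set.add st.1 e := by
  unfold pyA_innerstep
  simp only []
  split_ifs <;> first
    | exact Or.inl rfl
    | exact Or.inr ⟨_, rfl⟩

lemma pvInnerKeep (img : List (List (Int × Int × Int))) (xs0 ys0 gap dim x : Int) :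
    ∀ (ys : List Int) (st : PySem.Set (Int × Int × Int) × Int × Int), st.1 ≠ [] →
      (ys.foldl (pyA_innerstep img xs0 ys0 gap dim x) st).1 ≠ []
  | [], _, h => h
  | y :: ys, st, h => by
    rw [List.foldl_cons]
    apply pvInnerKeep img xs0 ys0 gap dim x ys
    rcases pvStepShape img xs0 ys0 gap dim x st y with hs | ⟨e, hs⟩
    · rw [hs]; exact h
    · rw [hs]; exact pvAddNeNil st.1 e

lemma pvOuterKeep (img : List (List (Int × Int × Int))) (xs0 ys0 bb gap dim : Int) :
    ∀ (cols : List Int) (st : PySem.Set (Int × Int × Int) × Int), st.1 ≠ [] →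
      (cols.foldl (pyA_colstep img xs0 ys0 bb gap dim) st).1 ≠ []
  | [], _, h => h
  | x :: cols, st, h => by
    rw [List.foldl_cons]
    apply pvOuterKeep img xs0 ys0 bb gap dim cols
    show (_ : PySem.Set (Int × Int × Int) × Int).1 ≠ []
    unfold pyA_colstep
    exact pvInnerKeep img xs0 ys0 gap dim x _ (st.1, st.2, ys0) h

-- dim = 0: the first non-red pixel of a column forces an emission
lemma pvInnerEmitZero (img : List (List (Int × Int × Int))) (xs0 ys0 gap x : Int) :
    ∀ (ys : List Int) (st : PySem.Set (Int × Int × Int) × Int × Int),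
      (∃ y ∈ ys, is_red img x (y + 1) = false) →
      (ys.foldl (pyA_innerstep img xs0 ys0 gap 0 x) st).1 ≠ []
  | [], _, hex => by simp at hex
  | y :: ys, st, hex => by
    rw [List.foldl_cons]
    by_cases hr : is_red img x (y + 1) = true
    · have hem : (st.2.1 + 1 == (0 : Int))
          ∨ ¬ (st.2.1 + 1 == (0 : Int)) := em _
      have hstep := pvStepShape img xs0 ys0 gap 0 x st y
      rcases hstep with hs | ⟨e, hs⟩
      · apply pvInnerEmitZero img xs0 ys0 gap x ys
        rcases hex with ⟨y', hy', hf⟩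
        rcases List.mem_cons.mp hy' with rfl | hy''
        · rw [hr] at hf; exact absurd hf (by simp)
        · exact ⟨y', hy'', hf⟩
      · apply pvInnerKeep
        rw [hs]
        exact pvAddNeNil st.1 e
    · have hr' : is_red img x (y + 1) = false := by
        rw [← Bool.not_eq_true]; exact hr
      have hstep : (pyA_innerstep img xs0 ys0 gap 0 x st y).1
          = PySem.Set.add st.1
              (PySem.Int.floordiv (x - xs0) gap,
               PySem.Int.floordiv (y + gap - ys0) gap,
               PySem.Int.floordiv (y - ys0) gap + 1) := by
        unfold pyA_innerstep
        simp only [hr', Bool.false_eq_true, if_false]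
        rw [if_pos (by simp)]
      apply pvInnerKeep
      rw [hstep]
      exact pvAddNeNil _ _

lemma pvOuterEmitZero (img : List (List (Int × Int × Int))) (xs0 ys0 bb gap : Int) :
    ∀ (cols : List Int) (st : PySem.Set (Int × Int × Int) × Int),
      (∃ x ∈ cols, ∃ y ∈ PySem.List.pyRange ys0 (bb + 1) gap, is_red img x (y + 1) = false) →
      (cols.foldl (pyA_colstep img xs0 ys0 bb gap 0) st).1 ≠ []
  | [], _, hex => by simp at hex
  | x :: cols, st, hex => by
    rw [List.foldl_cons]
    by_cases hx : ∃ y ∈ PySem.List.pyRange ys0 (bb + 1) gap, is_red img x (y + 1) = false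
    · apply pvOuterKeep
      show (_ : PySem.Set (Int × Int × Int) × Int).1 ≠ []
      unfold pyA_colstep
      exact pvInnerEmitZero img xs0 ys0 gap x _ (st.1, st.2, ys0) hx
    · apply pvOuterEmitZero img xs0 ys0 bb gap cols
      rcases hex with ⟨x', hx', hy⟩
      rcases List.mem_cons.mp hx' with rfl | hx''
      · exact absurd hy hx
      · exact ⟨x', hx'', hy⟩

-- dim = 0, every scanned pixel red: the counter is always positive at the test, nothing is emitted
lemma pvInnerAllRed (img : List (List (Int × Int × Int))) (xs0 ys0 gap x : Int) :
    ∀ (ys : List Int) (st : PySem.Set (Int × Int × Int) × Int × Int), 0 ≤ st.2.1 →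
      (∀ y ∈ ys, is_red img x (y + 1) = true) →
      (ys.foldl (pyA_innerstep img xs0 ys0 gap 0 x) st).1 = st.1
        ∧ 0 ≤ (ys.foldl (pyA_innerstep img xs0 ys0 gap 0 x) st).2.1
  | [], _, h, _ => ⟨rfl, h⟩
  | y :: ys, st, h, hall => by
    rw [List.foldl_cons]
    have hr : is_red img x (y + 1) = true := hall y (List.mem_cons_self)
    have hstep : pyA_innerstep img xs0 ys0 gap 0 x st y = (st.1, st.2.1 + 1, st.2.2) := by
      unfold pyA_innerstep
      simp only [hr, if_true]
      rw [if_neg (by simp only [beq_iff_eq]; omega)]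
    rw [hstep]
    exact pvInnerAllRed img xs0 ys0 gap x ys (st.1, st.2.1 + 1, st.2.2) (by dsimp; omega)
      (fun y' hy' => hall y' (List.mem_cons_of_mem y hy'))

lemma pvOuterAllRed (img : List (List (Int × Int × Int))) (xs0 ys0 bb gap : Int) :
    ∀ (cols : List Int) (ins : PySem.Set (Int × Int × Int)),
      (∀ x ∈ cols, ∀ y ∈ PySem.List.pyRange ys0 (bb + 1) gap, is_red img x (y + 1) = true) →
      (cols.foldl (pyA_colstep img xs0 ys0 bb gap 0) (ins, 0)).1 = ins
  | [], ins, _ => rfl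
  | x :: cols, ins, hall => by
    rw [List.foldl_cons]
    have hcol : pyA_colstep img xs0 ys0 bb gap 0 (ins, 0) x = (ins, 0) := by
      unfold pyA_colstep
      have := pvInnerAllRed img xs0 ys0 gap x (PySem.List.pyRange ys0 (bb + 1) gap)
        (ins, 0, ys0) (by norm_num) (hall x (List.mem_cons_self))
      simp only [this.1]
    rw [hcol]
    exact pvOuterAllRed img xs0 ys0 bb gap cols ins
      (fun x' hx' => hall x' (List.mem_cons_of_mem x hx'))

-- dim = 0: every element of ins is its own partner, the final filter keeps everything
lemma pvFilterSelf (ins : PySem.Set (Int × Int × Int)) :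
    ins.filter (fun t => PySem.Set.contains ins (t.1 + 0, t.2.1, t.2.2)) = ins := by
  apply List.filter_eq_self.mpr
  intro t ht
  have he : (t.1 + 0, t.2.1, t.2.2) = t := by simp
  rw [he]
  exact (PySem.Set.contains_iff ins t).mpr ht

-- ===== VERDICT (by name: the statement is the Claim_ definition above) =====
theorem get_possible_y_segments_spec : Claim_unchanged_get_possible_y_segments := by
  intro img xs0 ys0 rb bb gap dim hdom hpre
  unfold Spec_get_possible_y_segments
  intro hnd
  have hg : gap ≠ 0 := hpre
  by_cases h1 : 1 ≤ dim
  · -- main case: dim ≥ 1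
    set d : Nat := dim.toNat with hdnat
    have hd : 1 ≤ d := by omega
    have hdim : dim = (d : Int) := by omega
    unfold get_possible_y_segments get_possible_y_segments_alt
    rw [if_neg (by omega)]
    simp only []
    rw [pvPyRange_eq xs0 (rb + 1) hg]
    set N := pvRangeLen xs0 (rb + 1) gap with hN
    have hA := pvOuterA img xs0 ys0 bb gap dim hg d hd hdim (List.range N) PySem.Set.empty
    rw [hA]
    have henum := pvEnumMapRange' (fun k : Nat => xs0 + gap * (k : Int)) N 0
    rw [← List.range_eq_range'] at henum
    simp only [Nat.cast_zero] at henum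
    rw [henum]
    have hB := pvOuterB img xs0 ys0 bb gap dim hg d hd hdim (List.range N) PySem.Set.empty
    rw [hB]
  · by_cases h2 : dim = 0
    · -- dim = 0 outside D_: every scanned pixel is red, A emits nothing
      subst h2
      unfold get_possible_y_segments get_possible_y_segments_alt
      rw [if_pos (by omega)]
      simp only []
      have hall : ∀ x ∈ PySem.List.pyRange xs0 (rb + 1) gap,
          ∀ y ∈ PySem.List.pyRange ys0 (bb + 1) gap, is_red img x (y + 1) = true := by
        intro x hx y hy
        rw [pvIsRedIff]
        by_contra hne
        exact hnd ⟨rfl, x, hx, y, hy, hne⟩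
      rw [pvOuterAllRed img xs0 ys0 bb gap
        (PySem.List.pyRange xs0 (rb + 1) gap) PySem.Set.empty hall]
      rfl
    · -- dim < 0: A never emits, B returns []
      have hneg : dim < 0 := by omega
      unfold get_possible_y_segments get_possible_y_segments_alt
      rw [if_pos (by omega)]
      simp only []
      rw [pvOuterNoEmit img xs0 ys0 bb gap dim hneg
        (PySem.List.pyRange xs0 (rb + 1) gap) PySem.Set.empty]
      rfl

theorem get_possible_y_segments_changed : Claim_changed_get_possible_y_segments := by
  unfold Claim_changed_get_possible_y_segments; decide

theorem get_possible_y_segments_tight : Claim_exact_get_possible_y_segments := by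
  intro img xs0 ys0 rb bb gap dim hdom hpre hD
  obtain ⟨hdim0, x, hx, y, hy, hpix⟩ := hD
  subst hdim0
  have hB : get_possible_y_segments_alt img xs0 ys0 rb bb gap 0 = [] := by
    unfold get_possible_y_segments_alt
    rw [if_pos (by omega)]
  rw [hB]
  unfold get_possible_y_segments
  simp only []
  rw [pvFilterSelf]
  apply pvOuterEmitZero img xs0 ys0 bb gap (PySem.List.pyRange xs0 (rb + 1) gap)
    (PySem.Set.empty, 0)
  refine ⟨x, hx, y, hy, ?_⟩
  rw [← Bool.not_eq_true, pvIsRedIff]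
  exact hpix
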